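-- pv_equiv track=rewrite | github.com/CDL-AsTra/leaky_apps | analysis/analysis.py | parse_gitleaks_results
-- ===== SOURCE A (Python) =====
-- def parse_gitleaks_results(results, output_dir):
--     """
--     Parse Gitleaks JSON results and group by file path.
--     """
--     start = ""
--     if output_dir.startswith("/"):
--         start = "/"
--     elif output_dir.startswith("./"):
--         start = "./"
--     results_per_file = {}
--     for result in results:
--         file_path = result.get("File", "")
--         if file_path.endswith(".ownstrings"):
--             file_path = file_path[:-11]
--         if not file_path.startswith(start):
--             file_path = start + file_path
--         tmp = results_per_file.get(file_path, [])
--         tmp.append(result)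
--         results_per_file[file_path] = tmp
--     return results_per_file
-- ===== SOURCE B (Python) =====
-- def parse_gitleaks_results(results, output_dir):
--     """Group gitleaks results by normalized file path: distinct keys first (in
--     first-occurrence order), then one filter pass per key, instead of a single
--     dict-accumulating pass."""
--     if output_dir.startswith("/"):
--         start = "/"
--     elif output_dir.startswith("./"):
--         start = "./"
--     else:
--         start = ""
--
--     def norm(r):
--         p = r.get("File", "")
--         if p.endswith(".ownstrings"):
--             p = p[:-11]
--         return p if p.startswith(start) else start + p
--
--     keys = list(dict.fromkeys(norm(r) for r in results))
--     return {k: [r for r in results if norm(r) == k] for k in keys}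
-- ===== Notes on version B (the rewrite author's own statement) =====
-- stated objective: alternative
-- what changed: A builds the grouping in one pass with a dict of accumulating lists; B first computes the ordered distinct normalized keys (dict.fromkeys) and then builds each group with an independent filter pass over the results.
import Mathlib
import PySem

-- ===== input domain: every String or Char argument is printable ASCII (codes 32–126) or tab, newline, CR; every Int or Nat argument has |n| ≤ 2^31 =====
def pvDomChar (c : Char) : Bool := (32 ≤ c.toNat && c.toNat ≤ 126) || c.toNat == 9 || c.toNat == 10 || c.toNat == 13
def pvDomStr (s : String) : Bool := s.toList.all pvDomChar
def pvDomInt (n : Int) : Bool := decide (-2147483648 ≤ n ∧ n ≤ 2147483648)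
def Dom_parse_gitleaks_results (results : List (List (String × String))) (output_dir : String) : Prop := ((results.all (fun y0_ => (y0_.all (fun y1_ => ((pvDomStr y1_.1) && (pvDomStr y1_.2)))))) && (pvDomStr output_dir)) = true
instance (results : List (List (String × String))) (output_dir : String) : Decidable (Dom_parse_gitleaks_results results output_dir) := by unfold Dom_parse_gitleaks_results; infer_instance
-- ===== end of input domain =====

-- B groups by first computing the ordered distinct normalized keys and then one filter pass per key,
-- instead of A's single dict-accumulating pass (alternative decomposition, not faster).


-- ===== PORT A =====
-- start = "/" | "./" | "" depending on output_dir's prefix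
def pgrA_start (output_dir : String) : String :=
  if PySem.Str.startswith output_dir "/" then "/"
  else if PySem.Str.startswith output_dir "./" then "./"
  else ""

-- loop body: normalize result["File"] and append result to its group
def pgrA_step (start : String) (d : PySem.Dict String (List (List (String × String))))
    (result : List (String × String)) : PySem.Dict String (List (List (String × String))) :=
  let fp0 := (PySem.Dict.mk result).getD "File" ""
  let fp1 := if PySem.Str.endswith fp0 ".ownstrings" then PySem.Str.slice fp0 none (some (-11)) else fp0
  let fp2 := if PySem.Str.startswith fp1 start then fp1
             else String.ofList (start.toList ++ fp1.toList)   -- start + file_path (exact: Python str concat)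
  d.insert fp2 (d.getD fp2 [] ++ [result])

def parse_gitleaks_results (results : List (List (String × String))) (output_dir : String) :
    List (String × List (List (String × String))) :=
  (results.foldl (pgrA_step (pgrA_start output_dir)) PySem.Dict.empty).items

-- ===== PORT B =====
-- norm(r): the normalized path of one result
def pgrB_norm (start : String) (r : List (String × String)) : String :=
  let p0 := (PySem.Dict.mk r).getD "File" ""
  let p1 := if PySem.Str.endswith p0 ".ownstrings" then PySem.Str.slice p0 none (some (-11)) else p0
  if PySem.Str.startswith p1 start then p1
  else String.ofList (start.toList ++ p1.toList)   -- start + p (exact: Python str concat)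

def parse_gitleaks_results_alt (results : List (List (String × String))) (output_dir : String) :
    List (String × List (List (String × String))) :=
  let start := if PySem.Str.startswith output_dir "/" then "/"
               else if PySem.Str.startswith output_dir "./" then "./" else ""
  let keys := PySem.List.dedup (results.map (pgrB_norm start))
  keys.map (fun k => (k, results.filter (fun r => pgrB_norm start r == k)))

-- ===== PRECONDITION & SPEC =====
def Spec_parse_gitleaks_results (results : List (List (String × String))) (output_dir : String) (out : List (String × List (List (String × String)))) : Prop := out = parse_gitleaks_results_alt results output_dir
instance (results : List (List (String × String))) (output_dir : String) (out : List (String × List (List (String × String)))) : Decidable (Spec_parse_gitleaks_results results output_dir out) := by unfold Spec_parse_gitleaks_results; infer_instance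

-- ===== CLAIM (what is proved, stated in full; the proofs are below) =====
def Claim_equal_parse_gitleaks_results : Prop := ∀ (results : List (List (String × String))) (output_dir : String), Dom_parse_gitleaks_results results output_dir → Spec_parse_gitleaks_results results output_dir (parse_gitleaks_results results output_dir)

-- ===== LEMMAS AND PROOFS =====
theorem pgr_step_eq_modify (start : String) (d : PySem.Dict String (List (List (String × String))))
    (r : List (String × String)) :
    pgrA_step start d r = d.modify (pgrB_norm start r) [] (· ++ [r]) := by
  simp [pgrA_step, pgrB_norm, PySem.Dict.modify, PySem.Dict.getD_eq_get?_getD]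

theorem pgr_main (results : List (List (String × String))) (start : String) :
    (results.foldl (pgrA_step start) PySem.Dict.empty).items
      = (PySem.List.dedup (results.map (pgrB_norm start))).map
          (fun k => (k, results.filter (fun r => pgrB_norm start r == k))) := by
  have hfun : pgrA_step start = fun d r => d.modify (pgrB_norm start r) [] (· ++ [r]) :=
    funext fun d => funext fun r => pgr_step_eq_modify start d r
  have hml : List.foldl (fun d r => d.modify (pgrB_norm start r) [] (· ++ [r])) PySem.Dict.empty results
      = List.foldl (fun (d : PySem.Dict String (List (List (String × String)))) p => d.modify p.1 [] (· ++ [p.2]))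
          PySem.Dict.empty (results.map (fun r => (pgrB_norm start r, r))) := by rw [List.foldl_map]
  rw [hfun, hml]
  set l := results.map (fun r => (pgrB_norm start r, r)) with hl
  have hnd : (l.foldl (fun d p => d.modify p.1 [] (· ++ [p.2])) PySem.Dict.empty).keys.Nodup :=
    PySem.Dict.nodup_keys_foldl_modify_key l (fun p => p.1) [] (fun _ p => (· ++ [p.2]))
      PySem.Dict.empty PySem.Dict.nodup_keys_empty
  have hkeys : (l.foldl (fun d p => d.modify p.1 [] (· ++ [p.2])) PySem.Dict.empty).keys
      = PySem.List.dedup (results.map (pgrB_norm start)) := by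
    have h := PySem.Dict.keys_foldl_modify_key l (fun p => p.1) [] (fun _ p => (· ++ [p.2]))
      PySem.Dict.empty
    rw [h]
    simp [hl, PySem.Set.update_eq_append_filter, List.map_map, Function.comp_def]
  rw [PySem.Dict.items_eq_map_keys _ hnd ([] : List (List (String × String))), hkeys]
  refine List.map_congr_left (fun k hk => ?_)
  rw [PySem.Dict.getD_foldl_modify_append]
  simp [hl, List.filter_map, List.map_map, Function.comp_def]

-- ===== VERDICT (by name: the statement is the Claim_ definition above) =====
theorem parse_gitleaks_results_spec : Claim_equal_parse_gitleaks_results := by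
  intro results output_dir _
  unfold Spec_parse_gitleaks_results parse_gitleaks_results parse_gitleaks_results_alt
  exact pgr_main results _
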